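-- pv_equiv track=rewrite | github.com/pratikms/PyPlay | codingbat/Logic-2/lucky_sum.py | lucky_sum
-- ===== SOURCE A (Python) =====
-- def lucky_sum(a, b, c):
--     try:
--         collection = [a, b, c]
--         count = collection.index(13)
--     except Exception as error:
--         count = len(collection)
--     finally:
--         return sum([collection[index] for index in range(count)])
-- ===== SOURCE B (Python) =====
-- def lucky_sum(a, b, c):
--     total = 0
--     for v in (a, b, c):
--         if v == 13:
--             break
--         total += v
--     return total
-- ===== Notes on version B (the rewrite author's own statement) =====
-- stated objective: simpler
-- what changed: A scans for the index of 13 (inside try/except) and then sums a comprehension over range(count); B is a single early-exiting loop that accumulates values until it meets 13.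
import Mathlib
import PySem

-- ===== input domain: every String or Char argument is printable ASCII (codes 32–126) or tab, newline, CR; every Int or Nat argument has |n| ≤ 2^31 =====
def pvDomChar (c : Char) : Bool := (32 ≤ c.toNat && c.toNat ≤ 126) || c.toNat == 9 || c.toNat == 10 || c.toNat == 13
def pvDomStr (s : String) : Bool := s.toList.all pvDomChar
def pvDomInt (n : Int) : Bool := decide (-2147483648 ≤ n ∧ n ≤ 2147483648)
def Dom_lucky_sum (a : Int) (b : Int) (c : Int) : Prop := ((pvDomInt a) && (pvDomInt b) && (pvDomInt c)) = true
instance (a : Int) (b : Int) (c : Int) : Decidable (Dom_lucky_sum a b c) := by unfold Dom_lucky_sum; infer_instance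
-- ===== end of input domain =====

-- B replaces A's index(13)-then-sum-over-range two-pass scheme with one early-exiting accumulating loop (objective: simpler).

-- ===== PORT A =====
-- collection.index(13); count = 3 when absent (the except branch); then sum the comprehension over range(count).
def lucky_sum (a : Int) (b : Int) (c : Int) : Int :=
  let collection : List Int := [a, b, c]
  let count : Int :=
    match PySem.List.index? collection 13 with
    | some i => i
    | none => (collection.length : Int)
  ((PySem.List.pyRange 0 count 1).map
    (fun index => (PySem.List.pyGet? collection index).getD 0)).sum

-- ===== PORT B =====
-- the for-loop with break, as structural recursion over the tuple's values
def luckyLoop : Int → List Int → Int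
  | total, [] => total
  | total, v :: vs => if v = 13 then total else luckyLoop (total + v) vs

def lucky_sum_alt (a : Int) (b : Int) (c : Int) : Int :=
  luckyLoop 0 [a, b, c]

-- ===== PRECONDITION & SPEC =====
def Spec_lucky_sum (a : Int) (b : Int) (c : Int) (out : Int) : Prop := out = lucky_sum_alt a b c
instance (a : Int) (b : Int) (c : Int) (out : Int) : Decidable (Spec_lucky_sum a b c out) := by unfold Spec_lucky_sum; infer_instance

-- ===== CLAIM (what is proved, stated in full; the proofs are below) =====
def Claim_equal_lucky_sum : Prop := ∀ (a : Int) (b : Int) (c : Int), Dom_lucky_sum a b c → Spec_lucky_sum a b c (lucky_sum a b c)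

-- ===== LEMMAS AND PROOFS =====

-- ===== VERDICT (by name: the statement is the Claim_ definition above) =====
theorem lucky_sum_spec : Claim_equal_lucky_sum := by
  intro a b c _
  show lucky_sum a b c = lucky_sum_alt a b c
  by_cases ha : a = 13 <;> by_cases hb : b = 13 <;> by_cases hc : c = 13 <;>
    simp [lucky_sum, lucky_sum_alt, luckyLoop, PySem.List.index?, PySem.List.pyRange,
      PySem.List.pyGet?, PySem.List.pyIdx?, List.idxOf?, List.findIdx?, List.findIdx?.go,
      List.range_succ, ha, hb, hc] <;> omega
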